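-- pv_equiv track=rewrite | github.com/wubek/ProjectEuler | euler/euler035.py | generate_circular_lst
-- ===== SOURCE A (Python) =====
-- def generate_circular_lst(lst):
--     ret_lst = [lst]
--     for i in range(1,len(lst)):
--         new_lst = ""
--         for shift in range(0, len(lst)):
--             new_lst += lst[(i+shift)%len(lst)]
--         ret_lst.append(new_lst)
--     return ret_lst
-- ===== SOURCE B (Python) =====
-- def generate_circular_lst(lst):
--     n = len(lst)
--     doubled = lst + lst
--     return [lst] + [doubled[i:i + n] for i in range(1, n)]
-- ===== Notes on version B (the rewrite author's own statement) =====
-- stated objective: faster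
-- what changed: Replaces the per-character inner loop with modular indexing and string += by a single doubled buffer lst+lst from which each rotation is cut as one slice.
import Mathlib
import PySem

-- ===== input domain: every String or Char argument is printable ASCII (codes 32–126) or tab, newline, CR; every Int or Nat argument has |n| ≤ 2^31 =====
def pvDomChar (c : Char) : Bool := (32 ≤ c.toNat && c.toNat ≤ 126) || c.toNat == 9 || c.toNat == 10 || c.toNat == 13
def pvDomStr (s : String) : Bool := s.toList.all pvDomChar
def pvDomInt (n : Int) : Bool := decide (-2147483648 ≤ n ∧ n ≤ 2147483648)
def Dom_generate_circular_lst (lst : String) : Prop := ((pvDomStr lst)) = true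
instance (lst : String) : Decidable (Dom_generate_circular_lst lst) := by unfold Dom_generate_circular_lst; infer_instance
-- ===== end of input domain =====

-- B replaces A's per-character modular-index inner loop by slicing length-n windows from a doubled buffer lst+lst.


-- ===== PORT A =====
-- literal port of A; lst[(i+shift)%len(lst)] is ported with pyGetD: the modular index is
-- always in range (0 ≤ mod < len, and the loops only run when len > 0), so Python never raises here.
def generate_circular_lst (lst : String) : List String :=
  let cs := lst.toList
  let n : Int := cs.length
  (PySem.List.pyRange 1 n 1).foldl
    (fun ret_lst i =>
      ret_lst ++ [String.mk ((PySem.List.pyRange 0 n 1).foldl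
        (fun new_lst shift =>
          new_lst ++ [PySem.List.pyGetD cs (PySem.Int.mod (i + shift) n) ' ']) [])])
    [lst]

-- ===== PORT B =====
def generate_circular_lst_alt (lst : String) : List String :=
  let cs := lst.toList
  let n : Int := cs.length
  let doubled := cs ++ cs
  lst :: (PySem.List.pyRange 1 n 1).map
    (fun i => String.mk (PySem.List.slice doubled (some i) (some (i + n))))

-- ===== PRECONDITION & SPEC =====
def Spec_generate_circular_lst (lst : String) (out : List String) : Prop := out = generate_circular_lst_alt lst
instance (lst : String) (out : List String) : Decidable (Spec_generate_circular_lst lst out) := by unfold Spec_generate_circular_lst; infer_instance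

-- ===== CLAIM (what is proved, stated in full; the proofs are below) =====
def Claim_equal_generate_circular_lst : Prop := ∀ (lst : String), Dom_generate_circular_lst lst → Spec_generate_circular_lst lst (generate_circular_lst lst)

-- ===== LEMMAS AND PROOFS =====

theorem rot_eq_window (cs : List Char) (j : Nat) (hj : j ≤ cs.length) :
    (List.range cs.length).map (fun k => cs.getD ((j + k) % cs.length) ' ')
      = ((cs ++ cs).drop j).take cs.length := by
  apply List.ext_getElem
  · simp; omega
  · intro k h1 h2
    simp only [List.getElem_map, List.getElem_range, List.getElem_take, List.getElem_drop]
    have hlen : k < cs.length := by simpa using h1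
    rw [List.getD_eq_getElem cs ' ' (Nat.mod_lt _ (by omega))]
    rcases Nat.lt_or_ge (j + k) cs.length with h | h
    · rw [List.getElem_append_left (by omega)]
      congr 1
      exact Nat.mod_eq_of_lt h
    · rw [List.getElem_append_right (by omega)]
      congr 1
      rw [Nat.mod_eq_sub_mod h, Nat.mod_eq_of_lt (by omega)]

theorem generate_circular_lst_eq_alt (lst : String) : generate_circular_lst lst = generate_circular_lst_alt lst := by
  simp only [generate_circular_lst, generate_circular_lst_alt,
    PySem.List.foldl_append_singleton_eq_map]
  rw [List.singleton_append]
  congr 1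
  apply List.map_congr_left
  intro i hi
  rw [PySem.List.mem_pyRange_one] at hi
  obtain ⟨h1, h2⟩ := hi
  set cs := lst.toList with hcs
  obtain ⟨j, rfl⟩ : ∃ j : Nat, i = (j : Int) := ⟨i.toNat, (Int.toNat_of_nonneg (by omega)).symm⟩
  have hj : j < cs.length := by exact_mod_cast h2
  congr 1
  rw [List.nil_append, PySem.List.pyRange_zero_natCast, List.map_map]
  have : (fun k : Nat => PySem.List.pyGetD cs (PySem.Int.mod ((j:Int) + (k:Int)) (cs.length:Int)) ' ')
      = fun k : Nat => cs.getD ((j + k) % cs.length) ' ' := by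
    funext k
    rw [show (j:Int) + (k:Int) = ((j+k : Nat) : Int) by push_cast; ring,
      PySem.Int.mod_natCast, PySem.List.pyGetD_natCast]
  rw [PySem.List.slice_natCast_add, ← rot_eq_window cs j hj.le]
  exact List.map_congr_left (fun k _ => congrFun this k)

-- ===== VERDICT (by name: the statement is the Claim_ definition above) =====
theorem generate_circular_lst_spec : Claim_equal_generate_circular_lst := by
  intro lst _
  unfold Spec_generate_circular_lst
  exact generate_circular_lst_eq_alt lst
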